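-- pv_equiv track=rewrite | github.com/hzi09/Coding_Test | 프로그래머스/1/92334. 신고 결과 받기/신고 결과 받기.py | solution
-- ===== SOURCE A (Python) =====
-- def solution(id_list, report, k):
--     report = list(set(report))
--
--     id_dict = {user: 0 for user in id_list}
--
--     reposter_id = {user: set() for user in id_list}
--
--     for r in report:
--         reporter, reported = r.split()
--         if reported not in reposter_id[reporter]:
--             reposter_id[reporter].add(reported)
--             id_dict[reported] += 1
--
--     block = {user for user, count in id_dict.items() if count >= k}
--
--     answer = [0] * len(id_list)
--     for idx, uid in enumerate(id_list):
--         answer[idx] = sum(1 for reported in reposter_id[uid] if reported in block)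
--     return answer
-- ===== SOURCE B (Python) =====
-- def solution(id_list, report, k):
--     seen = set()
--     pairs = []
--     for r in report:
--         a, b = r.split()
--         if (a, b) not in seen:
--             seen.add((a, b))
--             pairs.append((a, b))
--     counts = {}
--     for a, b in pairs:
--         counts[b] = counts.get(b, 0) + 1
--     blocked = {b for b, c in counts.items() if c >= k}
--     return [sum(1 for a, b in pairs if a == uid and b in blocked) for uid in id_list]
-- ===== Notes on version B (the rewrite author's own statement) =====
-- stated objective: alternative
-- what changed: B dedups reports directly into a list of distinct (reporter, reported) pairs, counts reporters per reported user with one plain counting dict, and derives each answer by scanning the deduped pair list, instead of A's string-level set plus a per-reporter set kept in a dict for every user.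
import Mathlib
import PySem

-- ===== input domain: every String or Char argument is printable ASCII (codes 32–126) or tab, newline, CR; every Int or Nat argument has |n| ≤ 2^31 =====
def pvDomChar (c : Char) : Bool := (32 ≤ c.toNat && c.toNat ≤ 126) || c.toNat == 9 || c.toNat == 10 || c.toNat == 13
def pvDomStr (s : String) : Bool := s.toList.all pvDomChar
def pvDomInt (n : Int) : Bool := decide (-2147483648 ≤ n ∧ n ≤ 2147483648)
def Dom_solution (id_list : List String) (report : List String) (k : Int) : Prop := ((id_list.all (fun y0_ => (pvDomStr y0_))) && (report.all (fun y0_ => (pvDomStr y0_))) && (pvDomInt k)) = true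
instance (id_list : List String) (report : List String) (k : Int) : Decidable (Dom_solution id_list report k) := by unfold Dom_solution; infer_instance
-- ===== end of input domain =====

-- B dedups reports into a list of distinct (reporter, reported) pairs, counts reporters per
-- reported user in one counting dict, and derives each answer by scanning the deduped pair
-- list — no string-level set, no per-reporter set dict (objective: alternative decomposition).

-- ===== PORT A =====
-- body of A's 'for r in report:' loop
def solStepA (st : PySem.Dict String Int × PySem.Dict String (PySem.Set String)) (r : String) :
    PySem.Dict String Int × PySem.Dict String (PySem.Set String) :=
  match PySem.Str.split₀ r with
  | [reporter, reported] =>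
    -- Python raises KeyError on a missing key; Pre_ guarantees the keys are present, so getD is exact here
    let s := st.2.getD reporter PySem.Set.empty
    if PySem.Set.contains s reported then st
    else (st.1.insert reported (st.1.getD reported 0 + 1),
          st.2.insert reporter (PySem.Set.add s reported))
  | _ => st  -- unreachable under Pre_ (Python: ValueError on tuple unpacking)

def solution (id_list : List String) (report : List String) (k : Int) : List Int :=
  -- list(set(report)); the result is set-iteration-order independent (only counts and sets are built from it)
  let report1 : List String := PySem.Set.ofList report
  let id_dict : PySem.Dict String Int :=
    id_list.foldl (fun d user => d.insert user 0) PySem.Dict.empty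
  let reposter : PySem.Dict String (PySem.Set String) :=
    id_list.foldl (fun d user => d.insert user PySem.Set.empty) PySem.Dict.empty
  let st := report1.foldl solStepA (id_dict, reposter)
  let block : PySem.Set String :=
    PySem.Set.ofList ((st.1.items.filter (fun p => k ≤ p.2)).map (fun p => p.1))
  -- 'answer[idx] = sum(1 for reported in reposter_id[uid] if reported in block)' for each idx in order
  id_list.map (fun uid =>
    (((st.2.getD uid PySem.Set.empty).filter (fun v => PySem.Set.contains block v)).length : Int))

-- ===== PORT B =====
-- body of B's dedup loop over report
def solStepB (st : List (String × String) × PySem.Set (String × String)) (r : String) :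
    List (String × String) × PySem.Set (String × String) :=
  match PySem.Str.split₀ r with
  | [a, b] =>
    if PySem.Set.contains st.2 (a, b) then st
    else (st.1 ++ [(a, b)], PySem.Set.add st.2 (a, b))
  | _ => st  -- unreachable under Pre_ (Python: ValueError on tuple unpacking)

def solution_alt (id_list : List String) (report : List String) (k : Int) : List Int :=
  let pairs := (report.foldl solStepB ([], PySem.Set.empty)).1
  let counts : PySem.Dict String Int :=
    pairs.foldl (fun d p => d.insert p.2 (d.getD p.2 0 + 1)) PySem.Dict.empty
  let blocked : PySem.Set String :=
    PySem.Set.ofList ((counts.items.filter (fun p => k ≤ p.2)).map (fun p => p.1))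
  id_list.map (fun uid =>
    ((pairs.filter (fun p => p.1 == uid && PySem.Set.contains blocked p.2)).length : Int))

-- ===== PRECONDITION & SPEC =====
-- Pre_ excludes exactly the inputs where A raises: a report that does not split into two
-- tokens (ValueError on unpacking) or mentions a user not in id_list (KeyError).
def Pre_solution (id_list : List String) (report : List String) (k : Int) : Prop :=
  ∀ r ∈ report, (PySem.Str.split₀ r).length = 2 ∧ ∀ t ∈ PySem.Str.split₀ r, t ∈ id_list
instance (id_list : List String) (report : List String) (k : Int) : Decidable (Pre_solution id_list report k) := by unfold Pre_solution; infer_instance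
def pvWitness_solution : List String × List String × Int := (["muzi", "frodo"], ["muzi frodo", "frodo muzi", "muzi frodo"], 1)

def Spec_solution (id_list : List String) (report : List String) (k : Int) (out : List Int) : Prop := out = solution_alt id_list report k
instance (id_list : List String) (report : List String) (k : Int) (out : List Int) : Decidable (Spec_solution id_list report k out) := by unfold Spec_solution; infer_instance

-- ===== CLAIM (what is proved, stated in full; the proofs are below) =====
def Claim_equal_solution : Prop := ∀ (id_list : List String) (report : List String) (k : Int), Dom_solution id_list report k → Pre_solution id_list report k → Spec_solution id_list report k (solution id_list report k)

-- ===== LEMMAS AND PROOFS =====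

-- the (reporter, reported) pair of a report line (proof-side view of 'r.split()')
def pairOf (r : String) : String × String :=
  match PySem.Str.split₀ r with | [a, b] => (a, b) | _ => ("", "")

theorem split_eq_pair (r : String) (h : (PySem.Str.split₀ r).length = 2) :
    PySem.Str.split₀ r = [(pairOf r).1, (pairOf r).2] := by
  rcases hs : PySem.Str.split₀ r with _ | ⟨a, _ | ⟨b, _ | ⟨c, t⟩⟩⟩ <;> simp [hs] at h ⊢ <;> simp [pairOf, hs]

theorem stepB_eq (l : List (String × String)) (r : String) (h : (PySem.Str.split₀ r).length = 2) :
    solStepB (l, l) r = (PySem.Set.add l (pairOf r), PySem.Set.add l (pairOf r)) := by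
  unfold solStepB
  rw [split_eq_pair r h]
  by_cases hm : pairOf r ∈ l <;> simp [PySem.Set.add, hm]

theorem foldB_eq (rs : List String) (l : List (String × String))
    (h : ∀ r ∈ rs, (PySem.Str.split₀ r).length = 2) :
    rs.foldl solStepB (l, l) =
      (rs.foldl (fun s r => PySem.Set.add s (pairOf r)) l,
       rs.foldl (fun s r => PySem.Set.add s (pairOf r)) l) := by
  induction rs generalizing l with
  | nil => rfl
  | cons r t ih =>
    simp only [List.foldl_cons]
    rw [stepB_eq l r (h r (by simp))]
    exact ih _ (fun x hx => h x (by simp [hx]))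

theorem pairs_eq (report : List String) (h : ∀ r ∈ report, (PySem.Str.split₀ r).length = 2) :
    (report.foldl solStepB ([], PySem.Set.empty)).1 = PySem.Set.ofList (report.map pairOf) := by
  have he : (PySem.Set.empty : PySem.Set (String × String)) = ([] : List (String × String)) := rfl
  rw [he, foldB_eq report [] h, ← PySem.Set.update_map_eq_foldl_add, PySem.Set.update_nil_left]

theorem counts_eq (pairs : List (String × String)) :
    pairs.foldl (fun d p => d.insert p.2 (d.getD p.2 0 + 1)) PySem.Dict.empty
      = PySem.Dict.counter (pairs.map Prod.snd) := by
  rw [← PySem.Dict.foldl_insert_getD_add_one_eq_counter, List.foldl_map]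

theorem mem_blockSet (d : PySem.Dict String Int) (hk : d.keys.Nodup) (k : Int) (v : String) :
    v ∈ PySem.Set.ofList ((d.items.filter (fun p => k ≤ p.2)).map (fun p => p.1)) ↔
      ∃ c, d.get? v = some c ∧ k ≤ c := by
  rw [PySem.Set.mem_ofList]
  simp only [List.mem_map, List.mem_filter, decide_eq_true_eq]
  constructor
  · rintro ⟨⟨a, c⟩, ⟨hm, hle⟩, rfl⟩
    exact ⟨c, (PySem.Dict.get?_eq_some_iff_mem_items _ _ _ hk).2 hm, hle⟩
  · rintro ⟨c, hg, hle⟩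
    exact ⟨(v, c), ⟨(PySem.Dict.get?_eq_some_iff_mem_items _ _ _ hk).1 hg, hle⟩, rfl⟩

theorem init_get? {ν : Type} (c : ν) (l : List String) (d : PySem.Dict String ν) (v : String)
    (h : v ∈ l ∨ d.get? v = some c) :
    (l.foldl (fun d u => d.insert u c) d).get? v = some c := by
  induction l generalizing d with
  | nil => simpa using h
  | cons a t ih =>
    simp only [List.foldl_cons]
    apply ih
    rcases h with h | h
    · rcases List.mem_cons.1 h with rfl | h
      · by_cases hv : v ∈ t
        · exact Or.inl hv
        · right; rw [PySem.Dict.get?_insert]; simp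
      · exact Or.inl h
    · by_cases hva : v = a
      · right; rw [PySem.Dict.get?_insert]; simp [hva]
      · right; rw [PySem.Dict.get?_insert]; simp [hva, h]

theorem init_keys {ν : Type} (c : ν) (l : List String) :
    (l.foldl (fun d u => d.insert u c) PySem.Dict.empty).keys = PySem.Set.ofList l := by
  rw [PySem.Dict.keys_foldl_insert]
  rfl

-- invariant of A's report loop: Q is the set (as a nodup list) of distinct pairs seen so far
def InvA (id_list : List String) (Q : List (String × String))
    (st : PySem.Dict String Int × PySem.Dict String (PySem.Set String)) : Prop :=
  st.1.keys = PySem.Set.ofList id_list ∧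
  st.2.keys = PySem.Set.ofList id_list ∧
  (∀ v ∈ id_list, st.1.get? v = some ((Q.countP (fun p => p.2 == v) : Nat) : Int)) ∧
  (∀ u ∈ id_list, ∃ s : PySem.Set String, st.2.get? u = some s ∧ s.Nodup ∧ ∀ v, v ∈ s ↔ (u, v) ∈ Q)

theorem stepA_inv (id_list : List String) (Q : List (String × String))
    (st : PySem.Dict String Int × PySem.Dict String (PySem.Set String)) (r : String)
    (hInv : InvA id_list Q st) (h2 : (PySem.Str.split₀ r).length = 2)
    (ha : (pairOf r).1 ∈ id_list) (hb : (pairOf r).2 ∈ id_list) :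
    InvA id_list (PySem.Set.add Q (pairOf r)) (solStepA st r) := by
  obtain ⟨hk1, hk2, hc, hs⟩ := hInv
  obtain ⟨sa, hsa, hsaN, hsaM⟩ := hs _ ha
  unfold solStepA
  rw [split_eq_pair r h2]
  dsimp only
  rw [PySem.Dict.getD_of_get?_eq_some _ _ hsa]
  by_cases hmem : (pairOf r).2 ∈ sa
  · have hQ : pairOf r ∈ Q := (hsaM _).1 hmem
    rw [if_pos ((PySem.Set.contains_iff _ _).2 hmem)]
    have hadd : PySem.Set.add Q (pairOf r) = Q := by simp [PySem.Set.add, hQ]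
    rw [hadd]
    exact ⟨hk1, hk2, hc, hs⟩
  · rw [if_neg (by simp [PySem.Set.contains_iff, hmem])]
    have hQ : pairOf r ∉ Q := fun h => hmem ((hsaM _).2 h)
    have hadd : PySem.Set.add Q (pairOf r) = Q ++ [pairOf r] := by simp [PySem.Set.add, hQ]
    rw [hadd]
    refine ⟨?_, ?_, ?_, ?_⟩
    · exact (PySem.Dict.keys_insert_of_contains _ _
        (by rw [PySem.Dict.contains_iff_mem_keys, hk1, PySem.Set.mem_ofList]; exact hb)).trans hk1
    · exact (PySem.Dict.keys_insert_of_contains _ _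
        (by rw [PySem.Dict.contains_iff_mem_keys, hk2, PySem.Set.mem_ofList]; exact ha)).trans hk2
    · intro v hv
      rw [PySem.Dict.get?_insert]
      by_cases hvb : v = (pairOf r).2
      · subst hvb
        rw [if_pos rfl, PySem.Dict.getD_of_get?_eq_some _ _ (hc _ hv)]
        have hcnt : (Q ++ [pairOf r]).countP (fun p => p.2 == (pairOf r).2) =
            Q.countP (fun p => p.2 == (pairOf r).2) + 1 := by
          simp [List.countP_append]
        rw [hcnt]
        push_cast
        ring_nf
      · rw [if_neg hvb, hc _ hv]
        have hcnt : (Q ++ [pairOf r]).countP (fun p => p.2 == v) =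
            Q.countP (fun p => p.2 == v) := by
          simp only [List.countP_append, List.countP_cons, List.countP_nil]
          simp [Ne.symm hvb]
        rw [hcnt]
    · intro u hu
      rw [PySem.Dict.get?_insert]
      by_cases hua : u = (pairOf r).1
      · subst hua
        refine ⟨sa ++ [(pairOf r).2], by rw [if_pos rfl]; simp [PySem.Set.add, hmem], ?_, ?_⟩
        · simp [List.nodup_append, hsaN]
          intro a ha hae
          exact hmem (hae ▸ ha)
        · intro v
          constructor
          · intro hv
            rcases List.mem_append.1 hv with hv | hv
            · exact List.mem_append_left _ ((hsaM v).1 hv)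
            · simp at hv
              subst hv
              simp
          · intro hv
            rcases List.mem_append.1 hv with hv | hv
            · exact List.mem_append_left _ ((hsaM v).2 hv)
            · simp at hv
              rw [congrArg Prod.snd hv.symm]
              simp
      · obtain ⟨su, hsu, hsuN, hsuM⟩ := hs u hu
        rw [if_neg hua]
        refine ⟨su, hsu, hsuN, fun v => ?_⟩
        rw [hsuM v]
        constructor
        · exact fun h => List.mem_append_left _ h
        · intro h
          rcases List.mem_append.1 h with h | h
          · exact h
          · simp at h
            exact absurd (congrArg Prod.fst h) hua

theorem foldA_inv (id_list : List String) (rs : List String) :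
    ∀ (Q : List (String × String)) st, InvA id_list Q st →
    (∀ r ∈ rs, (PySem.Str.split₀ r).length = 2 ∧ ∀ t ∈ PySem.Str.split₀ r, t ∈ id_list) →
    InvA id_list (rs.foldl (fun Q r => PySem.Set.add Q (pairOf r)) Q) (rs.foldl solStepA st) := by
  induction rs with
  | nil => intro Q st h _; simpa using h
  | cons r t ih =>
    intro Q st h hpre
    simp only [List.foldl_cons]
    have h2 := (hpre r (by simp)).1
    have htok := (hpre r (by simp)).2
    have ha : (pairOf r).1 ∈ id_list := htok _ (by rw [split_eq_pair r h2]; simp)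
    have hb : (pairOf r).2 ∈ id_list := htok _ (by rw [split_eq_pair r h2]; simp)
    exact ih _ _ (stepA_inv _ _ _ _ h h2 ha hb) (fun x hx => hpre x (by simp [hx]))

theorem foldQ_eq (rs : List String) :
    rs.foldl (fun Q r => PySem.Set.add Q (pairOf r)) [] = PySem.Set.ofList (rs.map pairOf) := by
  rw [← PySem.Set.update_map_eq_foldl_add, PySem.Set.update_nil_left]


theorem mem_blockedB (xs : List String) (k : Int) (v : String) :
    v ∈ PySem.Set.ofList (((PySem.Dict.counter xs).items.filter (fun p => k ≤ p.2)).map (fun p => p.1)) ↔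
      v ∈ xs ∧ k ≤ (xs.count v : Int) := by
  rw [PySem.Set.mem_ofList]
  simp only [PySem.Dict.items_counter, List.mem_map, List.mem_filter, decide_eq_true_eq]
  constructor
  · rintro ⟨⟨a, c⟩, ⟨hm, hle⟩, rfl⟩
    obtain ⟨u, hu, he⟩ := hm
    have ha : u = a := congrArg Prod.fst he
    have hc : ((xs.count u : Nat) : Int) = c := congrArg Prod.snd he
    subst ha
    exact ⟨(PySem.Set.mem_ofList _ _).1 hu, by rw [hc]; exact hle⟩
  · rintro ⟨hv, hle⟩
    exact ⟨(v, (xs.count v : Int)), ⟨⟨v, (PySem.Set.mem_ofList _ _).2 hv, rfl⟩, hle⟩, rfl⟩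

theorem count_map_snd (P : List (String × String)) (v : String) :
    (P.map Prod.snd).count v = P.countP (fun p => p.2 == v) := by
  rw [List.count_eq_countP, List.countP_map]
  rfl


-- rfl views of the two ports (zeta-expanded), used to rewrite the goal
def stA (id_list report : List String) :
    PySem.Dict String Int × PySem.Dict String (PySem.Set String) :=
  (PySem.Set.ofList report).foldl solStepA
    (id_list.foldl (fun d user => d.insert user 0) PySem.Dict.empty,
     id_list.foldl (fun d user => d.insert user PySem.Set.empty) PySem.Dict.empty)

def blockOf (d : PySem.Dict String Int) (k : Int) : PySem.Set String :=
  PySem.Set.ofList ((d.items.filter (fun p => k ≤ p.2)).map (fun p => p.1))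

def pairsB (report : List String) : List (String × String) :=
  (report.foldl solStepB ([], PySem.Set.empty)).1

theorem solution_eq (id_list report : List String) (k : Int) :
    solution id_list report k =
      id_list.map (fun uid =>
        ((((stA id_list report).2.getD uid PySem.Set.empty).filter
            (fun v => PySem.Set.contains (blockOf (stA id_list report).1 k) v)).length : Int)) := rfl

theorem solution_alt_eq (id_list report : List String) (k : Int) :
    solution_alt id_list report k =
      id_list.map (fun uid =>
        (((pairsB report).filter (fun p => p.1 == uid &&
            PySem.Set.contains
              (blockOf ((pairsB report).foldl
                  (fun d p => d.insert p.2 (d.getD p.2 0 + 1)) PySem.Dict.empty) k) p.2)).length : Int)) := rfl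

-- ===== VERDICT (by name: the statement is the Claim_ definition above) =====
theorem solution_spec : Claim_equal_solution := by
  unfold Claim_equal_solution
  intro id_list report k _ hpre
  unfold Spec_solution
  have h2 : ∀ r ∈ report, (PySem.Str.split₀ r).length = 2 := fun r hr => (hpre r hr).1
  have hPB : pairsB report = PySem.Set.ofList (report.map pairOf) := pairs_eq report h2
  rw [solution_eq, solution_alt_eq, hPB, counts_eq]
  have hInv0 : InvA id_list []
      (id_list.foldl (fun d user => d.insert user 0) PySem.Dict.empty,
       id_list.foldl (fun d user => d.insert user PySem.Set.empty) PySem.Dict.empty) := by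
    refine ⟨init_keys _ _, init_keys _ _, ?_, ?_⟩
    · intro v hv
      simpa using init_get? (0 : Int) id_list PySem.Dict.empty v (Or.inl hv)
    · intro u hu
      exact ⟨[], init_get? _ id_list PySem.Dict.empty u (Or.inl hu), by simp, by simp⟩
  have hpre1 : ∀ r ∈ (PySem.Set.ofList report : List String),
      (PySem.Str.split₀ r).length = 2 ∧ ∀ t ∈ PySem.Str.split₀ r, t ∈ id_list :=
    fun r hr => hpre r ((PySem.Set.mem_ofList _ _).1 hr)
  have hInvRaw := foldA_inv id_list (PySem.Set.ofList report) [] _ hInv0 hpre1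
  rw [foldQ_eq] at hInvRaw
  have hInv : InvA id_list (PySem.Set.ofList ((PySem.Set.ofList report).map pairOf))
      (stA id_list report) := hInvRaw
  set P := PySem.Set.ofList (report.map pairOf) with hPdef
  set QA := PySem.Set.ofList ((PySem.Set.ofList report).map pairOf) with hQAdef
  obtain ⟨hk1, hk2, hc, hs⟩ := hInv
  have hQP : ∀ p, p ∈ QA ↔ p ∈ P := by
    intro p
    rw [hQAdef, hPdef]
    simp only [PySem.Set.mem_ofList, List.mem_map]
  have hQAnd : QA.Nodup := hQAdef ▸ PySem.Set.nodup_ofList _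
  have hPnd : P.Nodup := hPdef ▸ PySem.Set.nodup_ofList _
  have hperm : QA.Perm P := (List.perm_ext_iff_of_nodup hQAnd hPnd).mpr hQP
  have hcnt : ∀ v, QA.countP (fun p => p.2 == v) = P.countP (fun p => p.2 == v) :=
    fun v => hperm.countP_congr (fun x _ => rfl)
  have hcomp : ∀ p, p ∈ P → p.1 ∈ id_list ∧ p.2 ∈ id_list := by
    intro p hp
    rw [hPdef, PySem.Set.mem_ofList] at hp
    obtain ⟨r, hr, rfl⟩ := List.mem_map.1 hp
    have h2r := (hpre r hr).1
    have htok := (hpre r hr).2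
    constructor
    · exact htok _ (by rw [split_eq_pair r h2r]; simp)
    · exact htok _ (by rw [split_eq_pair r h2r]; simp)
  have hk1nd : (stA id_list report).1.keys.Nodup := by
    rw [hk1]; exact PySem.Set.nodup_ofList _
  have hblockA : ∀ v, PySem.Set.contains (blockOf (stA id_list report).1 k) v = true ↔
      (v ∈ id_list ∧ k ≤ (P.countP (fun p => p.2 == v) : Int)) := by
    intro v
    rw [PySem.Set.contains_iff]
    unfold blockOf
    rw [mem_blockSet _ hk1nd]
    constructor
    · rintro ⟨c, hg, hle⟩
      by_cases hv : v ∈ id_list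
      · have hceq : c = ((QA.countP (fun p => p.2 == v) : Nat) : Int) :=
          (Option.some.inj ((hc v hv).symm.trans hg)).symm
        rw [hceq, hcnt v] at hle
        exact ⟨hv, hle⟩
      · exfalso
        have hnone : (stA id_list report).1.get? v = none := by
          apply (PySem.Dict.get?_eq_none_iff_not_mem_keys _ _).2
          rw [hk1]
          exact fun hm => hv ((PySem.Set.mem_ofList _ _).1 hm)
        rw [hnone] at hg
        cases hg
    · rintro ⟨hv, hle⟩
      exact ⟨_, hc v hv, by rw [hcnt v]; exact hle⟩
  have hblockB : ∀ v, PySem.Set.contains (blockOf (PySem.Dict.counter (P.map Prod.snd)) k) v = true ↔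
      (v ∈ P.map Prod.snd ∧ k ≤ (P.countP (fun p => p.2 == v) : Int)) := by
    intro v
    rw [PySem.Set.contains_iff]
    unfold blockOf
    rw [mem_blockedB]
    rw [count_map_snd P v]
  refine List.map_congr_left (fun uid huid => ?_)
  obtain ⟨s, hgs, hsN, hsM⟩ := hs uid huid
  rw [PySem.Dict.getD_of_get?_eq_some _ _ hgs]
  congr 1
  rw [← List.countP_eq_length_filter, ← List.countP_eq_length_filter]
  have hA : s.countP (fun v => PySem.Set.contains (blockOf (stA id_list report).1 k) v)
      = s.countP (fun v => decide (k ≤ (P.countP (fun p => p.2 == v) : Int))) := by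
    refine List.countP_congr (fun v hv => ?_)
    have hvP : (uid, v) ∈ P := (hQP _).1 ((hsM v).1 hv)
    have hvid : v ∈ id_list := (hcomp _ hvP).2
    by_cases hle : k ≤ (P.countP (fun p => p.2 == v) : Int)
    · rw [(hblockA v).2 ⟨hvid, hle⟩]
      simp [hle]
    · have hf : PySem.Set.contains (blockOf (stA id_list report).1 k) v = false := by
        rw [Bool.eq_false_iff]
        exact fun hct => hle ((hblockA v).1 hct).2
      rw [hf]
      simp [hle]
  have hB : P.countP (fun p => p.1 == uid &&
        PySem.Set.contains (blockOf (PySem.Dict.counter (P.map Prod.snd)) k) p.2)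
      = P.countP (fun p => p.1 == uid && decide (k ≤ (P.countP (fun q => q.2 == p.2) : Int))) := by
    refine List.countP_congr (fun p hp => ?_)
    have hsnd : p.2 ∈ P.map Prod.snd := List.mem_map.2 ⟨p, hp, rfl⟩
    by_cases hle : k ≤ (P.countP (fun q => q.2 == p.2) : Int)
    · rw [(hblockB p.2).2 ⟨hsnd, hle⟩]
      simp [hle]
    · have hf : PySem.Set.contains (blockOf (PySem.Dict.counter (P.map Prod.snd)) k) p.2 = false := by
        rw [Bool.eq_false_iff]
        exact fun hct => hle ((hblockB p.2).1 hct).2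
      rw [hf]
      simp [hle]
  rw [hA, hB]
  have hand : ∀ (pred : String → Bool),
      P.countP (fun p => p.1 == uid && pred p.2)
        = ((P.filter (fun p => p.1 == uid)).map Prod.snd).countP pred := by
    intro pred
    rw [List.countP_map, List.countP_filter]
    refine List.countP_congr (fun p hp => ?_)
    simp [Function.comp, Bool.and_comm]
  rw [hand (fun v => decide (k ≤ (P.countP (fun q => q.2 == v) : Int)))]
  have hLnd : ((P.filter (fun p => p.1 == uid)).map Prod.snd).Nodup := by
    refine List.Nodup.map_on ?_ (hPnd.filter _)
    rintro ⟨a1, b1⟩ h1 ⟨a2, b2⟩ h2 hb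
    have e1 : a1 = uid := by simpa using (List.mem_filter.1 h1).2
    have e2 : a2 = uid := by simpa using (List.mem_filter.1 h2).2
    simp only at hb
    simp [e1, e2, hb]
  have hLm : ∀ v, v ∈ (P.filter (fun p => p.1 == uid)).map Prod.snd ↔ (uid, v) ∈ P := by
    intro v
    simp only [List.mem_map, List.mem_filter]
    constructor
    · rintro ⟨⟨a, b⟩, ⟨hp, ha⟩, rfl⟩
      have haeq : a = uid := by simpa using ha
      rwa [haeq] at hp
    · intro hp
      exact ⟨(uid, v), ⟨hp, by simp⟩, rfl⟩
  have hsL : s.Perm ((P.filter (fun p => p.1 == uid)).map Prod.snd) :=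
    (List.perm_ext_iff_of_nodup hsN hLnd).mpr
      (fun v => Iff.trans (hsM v) (Iff.trans (hQP _) (hLm v).symm))
  exact hsL.countP_congr (fun x _ => rfl)
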